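-- pv_equiv track=rewrite | github.com/nya3jp/aoc2019 | day17/day17a.py | solve
-- ===== SOURCE A (Python) =====
-- def solve(field_str: str) -> int:
--     field = field_str.strip().splitlines()
--     h, w = len(field), len(field[0])
--
--     s = 0
--     for i, row in enumerate(field):
--         if i == 0 or i == h-1:
--             continue
--         for j, c in enumerate(row):
--             if j == 0 or j == w-1:
--                 continue
--             if c + field[i][j-1] + field[i][j+1] + field[i-1][j] + field[i+1][j] == '#####':
--                 s += i * j
--     return s
-- ===== SOURCE B (Python) =====
-- def solve(field_str: str) -> int:
--     lines = field_str.strip().splitlines()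
--     # horizontal triples: cells that are the centre of '###' within their row
--     horiz = set()
--     for i, row in enumerate(lines):
--         for j in range(1, len(row) - 1):
--             if row[j - 1:j + 2] == '###':
--                 horiz.add((i, j))
--     # vertical triples: cells that are the centre of '###' within their column
--     vert = set()
--     for j, col in enumerate(zip(*lines)):
--         for i in range(1, len(col) - 1):
--             if col[i - 1] == col[i] == col[i + 1] == '#':
--                 vert.add((i, j))
--     # an intersection is exactly a cell that is the centre of both
--     return sum(i * j for (i, j) in horiz & vert)
-- ===== Notes on version B (the rewrite author's own statement) =====
-- stated objective: alternative
-- what changed: B replaces A's single nested scan testing all five neighbours at once by two independent staged passes -- a row pass collecting centres of horizontal '###' runs via slice comparison and a column pass over the transposed grid (zip(*lines)) collecting centres of vertical runs -- and returns the sum of i*j over the intersection of the two sets.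
-- outside the precondition, e.g. on solve('##\n##\n#'): A returns 0, B returns 0
import Mathlib
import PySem

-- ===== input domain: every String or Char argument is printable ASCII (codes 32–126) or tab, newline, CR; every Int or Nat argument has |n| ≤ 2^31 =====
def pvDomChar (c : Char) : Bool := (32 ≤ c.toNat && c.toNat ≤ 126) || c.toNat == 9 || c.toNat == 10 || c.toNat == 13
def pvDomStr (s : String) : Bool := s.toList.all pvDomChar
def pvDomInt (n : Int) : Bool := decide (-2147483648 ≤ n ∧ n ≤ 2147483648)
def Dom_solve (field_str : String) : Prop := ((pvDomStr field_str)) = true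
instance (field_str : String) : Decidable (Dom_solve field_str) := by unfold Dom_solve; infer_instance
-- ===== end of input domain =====

-- B replaces A's single nested scan that tests a cell and its four neighbours at once by two
-- independent staged passes — a row pass collecting centres of horizontal '###' runs and a
-- column pass over the transposed grid collecting centres of vertical runs — and sums i*j over
-- the intersection of the two sets (objective: alternative).

-- ===== PORT A =====
-- field[i][j] : none = IndexError (out of range never happens under Pre_solve)
def cellA (field : List String) (i j : Int) : Option Char :=
  (PySem.List.pyGet? field i).bind (fun row => PySem.Str.pyGet? row j)

def solve (field_str : String) : Int :=
  let field := PySem.Str.splitlines (PySem.Str.strip field_str)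
  let h : Int := field.length
  -- len(field[0]); `none` = IndexError on an empty field (excluded by Pre_solve)
  let w : Int := (PySem.List.pyGet? field 0).elim 0 PySem.Str.len
  (PySem.List.enumerate field).foldl (fun s iw =>
    if iw.1 = 0 ∨ iw.1 = h - 1 then s
    else
      (PySem.List.enumerate iw.2.toList).foldl (fun s jc =>
        if jc.1 = 0 ∨ jc.1 = w - 1 then s
        else
          -- c + field[i][j-1] + field[i][j+1] + field[i-1][j] + field[i+1][j] == '#####'
          -- (an out-of-range access is an IndexError in Python; excluded by Pre_solve)
          if [some jc.2, cellA field iw.1 (jc.1 - 1), cellA field iw.1 (jc.1 + 1),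
              cellA field (iw.1 - 1) jc.1, cellA field (iw.1 + 1) jc.1]
             = [some '#', some '#', some '#', some '#', some '#']
          then s + iw.1 * jc.1 else s) s) 0

-- ===== PORT B =====
-- zip(*lines) on the rows as character lists: truncates at the shortest row, like Python's zip
def pyZipStar (ls : List (List Char)) : List (List Char) :=
  if _h : ls ≠ [] ∧ ∀ l ∈ ls, l ≠ [] then
    ls.map (fun l => l.headD ' ') :: pyZipStar (ls.map List.tail)
  else []
termination_by (ls.headD []).length
decreasing_by
  obtain ⟨hne, hall⟩ := _h
  cases ls with
  | nil => exact absurd rfl hne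
  | cons a t =>
    have ha := hall a (List.mem_cons_self ..)
    cases a with
    | nil => exact absurd rfl ha
    | cons c cs => simp

-- horiz: for each row, the j with row[j-1:j+2] == '###'
def hsetOf (lines : List String) : PySem.Set (Int × Int) :=
  (PySem.List.enumerate lines).foldl (fun S iw =>
    (PySem.List.pyRange 1 (PySem.Str.len iw.2 - 1) 1).foldl (fun S j =>
      if PySem.List.slice iw.2.toList (some (j - 1)) (some (j + 2)) = ['#', '#', '#']
      then PySem.Set.add S (iw.1, j) else S) S) PySem.Set.empty

-- vert: for each column of zip(*lines), the i with col[i-1] == col[i] == col[i+1] == '#'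
def vsetOf (lines : List String) : PySem.Set (Int × Int) :=
  (PySem.List.enumerate (pyZipStar (lines.map String.toList))).foldl (fun S jcol =>
    (PySem.List.pyRange 1 ((jcol.2.length : Int) - 1) 1).foldl (fun S i =>
      if PySem.List.pyGet? jcol.2 (i - 1) = PySem.List.pyGet? jcol.2 i ∧
         PySem.List.pyGet? jcol.2 i = PySem.List.pyGet? jcol.2 (i + 1) ∧
         PySem.List.pyGet? jcol.2 (i + 1) = some '#'
      then PySem.Set.add S (i, jcol.1) else S) S) PySem.Set.empty

def solve_alt (field_str : String) : Int :=
  let lines := PySem.Str.splitlines (PySem.Str.strip field_str)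
  let horiz := hsetOf lines
  let vert := vsetOf lines
  -- sum(i*j for (i,j) in horiz & vert): Python iterates the set in hash order; the Int sum is
  -- order-independent, so the intersection in horiz's insertion order is exact on the result
  (PySem.Set.inter horiz vert).foldl (fun s p => s + p.1 * p.2) 0

-- ===== PRECONDITION & SPEC =====
-- Pre_ excludes the empty field (A raises IndexError on field[0]) and ragged grids (unequal
-- line lengths), on which A almost always raises IndexError on a neighbour access and on which,
-- in the remaining degenerate cases, its skipping of column w-1 is an accident of using
-- len(field[0]) for every row.
def Pre_solve (field_str : String) : Prop :=
  PySem.Str.splitlines (PySem.Str.strip field_str) ≠ [] ∧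
  ∀ l ∈ PySem.Str.splitlines (PySem.Str.strip field_str),
    PySem.Str.len l =
      PySem.Str.len ((PySem.Str.splitlines (PySem.Str.strip field_str)).headD "")
instance (field_str : String) : Decidable (Pre_solve field_str) := by
  unfold Pre_solve; infer_instance

def pvWitness_solve : String := "###\n###\n###"

def Spec_solve (field_str : String) (out : Int) : Prop := out = solve_alt field_str
instance (field_str : String) (out : Int) : Decidable (Spec_solve field_str out) := by
  unfold Spec_solve; infer_instance

-- ===== CLAIM (what is proved, stated in full; the proofs are below) =====
def Claim_equal_solve : Prop :=
  ∀ (field_str : String), Dom_solve field_str → Pre_solve field_str →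
    Spec_solve field_str (solve field_str)

-- ===== LEMMAS AND PROOFS =====

-- the row pass as a flat list: row-major centres of horizontal runs
def hFlat (lines : List String) : List (Int × Int) :=
  (PySem.List.enumerate lines).flatMap (fun iw =>
    ((PySem.List.pyRange 1 (PySem.Str.len iw.2 - 1) 1).filter (fun j =>
      decide (PySem.List.slice iw.2.toList (some (j - 1)) (some (j + 2)) = ['#', '#', '#']))).map
      (fun j => (iw.1, j)))

-- the column pass as a flat list: column-major centres of vertical runs
def vFlat (cols : List (List Char)) : List (Int × Int) :=
  (PySem.List.enumerate cols).flatMap (fun jcol =>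
    ((PySem.List.pyRange 1 ((jcol.2.length : Int) - 1) 1).filter (fun i =>
      decide (PySem.List.pyGet? jcol.2 (i - 1) = PySem.List.pyGet? jcol.2 i ∧
        PySem.List.pyGet? jcol.2 i = PySem.List.pyGet? jcol.2 (i + 1) ∧
        PySem.List.pyGet? jcol.2 (i + 1) = some '#'))).map
      (fun i => (i, jcol.1)))

-- a Set.add loop over distinct fresh indices appends the filtered, embedded list
lemma fold_add_fresh (cond : Int → Prop) [DecidablePred cond] (emb : Int → Int × Int)
    (hinj : ∀ j k, emb j = emb k → j = k) :
    ∀ (l : List Int) (S : List (Int × Int)), l.Nodup → (∀ q ∈ S, ∀ j ∈ l, q ≠ emb j) →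
    l.foldl (fun S j => if cond j then PySem.Set.add S (emb j) else S) S
      = S ++ (l.filter (fun j => decide (cond j))).map emb := by
  intro l
  induction l with
  | nil => intro S _ _; simp
  | cons j t ih =>
    intro S hnd hfresh
    simp only [List.foldl_cons, List.filter_cons]
    rcases List.nodup_cons.mp hnd with ⟨hjt, hndt⟩
    by_cases hc : cond j
    · have hmem : emb j ∉ S := fun hm => hfresh _ hm j (by simp) rfl
      rw [if_pos hc, PySem.Set.add_of_not_mem hmem]
      rw [ih (S ++ [emb j]) hndt ?_]
      · simp [hc]
      · intro q hq k hk
        rcases List.mem_append.mp hq with hq | hq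
        · exact hfresh _ hq k (by simp [hk])
        · simp only [List.mem_singleton] at hq
          subst hq
          intro he
          exact hjt (hinj k j he.symm ▸ hk)
    · rw [if_neg hc]
      rw [ih S hndt (fun q hq k hk => hfresh _ hq k (by simp [hk]))]
      simp [hc]

lemma hset_eq_flat (lines : List String) :
    ∀ (s0 : Int) (S : List (Int × Int)), (∀ q ∈ S, q.1 < s0) →
    (PySem.List.enumerate lines s0).foldl (fun S iw =>
      (PySem.List.pyRange 1 (PySem.Str.len iw.2 - 1) 1).foldl (fun S j =>
        if PySem.List.slice iw.2.toList (some (j - 1)) (some (j + 2)) = ['#', '#', '#']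
        then PySem.Set.add S (iw.1, j) else S) S) S
    = S ++ (PySem.List.enumerate lines s0).flatMap (fun iw =>
        ((PySem.List.pyRange 1 (PySem.Str.len iw.2 - 1) 1).filter (fun j =>
          decide (PySem.List.slice iw.2.toList (some (j - 1)) (some (j + 2)) = ['#', '#', '#']))).map
          (fun j => (iw.1, j))) := by
  induction lines with
  | nil => intro s0 S _; simp [PySem.List.enumerate_nil]
  | cons l t ih =>
    intro s0 S h
    rw [PySem.List.enumerate_cons]
    simp only [List.foldl_cons, List.flatMap_cons]
    rw [fold_add_fresh _ (fun j => (s0, j)) (fun j k he => (Prod.mk.injEq .. ▸ he).2)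
      _ _ (PySem.List.nodup_pyRange_one _ _)
      (fun q hq j _ he => absurd (he ▸ rfl : q.1 = s0) (by have := h _ hq; omega))]
    rw [ih (s0 + 1) _ ?_]
    · simp
    · intro q hq
      rcases List.mem_append.mp hq with hq | hq
      · have := h _ hq; omega
      · rcases List.mem_map.mp hq with ⟨j, _, rfl⟩; simp

lemma vset_eq_flat (cols : List (List Char)) :
    ∀ (s0 : Int) (S : List (Int × Int)), (∀ q ∈ S, q.2 < s0) →
    (PySem.List.enumerate cols s0).foldl (fun S jcol =>
      (PySem.List.pyRange 1 ((jcol.2.length : Int) - 1) 1).foldl (fun S i =>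
        if PySem.List.pyGet? jcol.2 (i - 1) = PySem.List.pyGet? jcol.2 i ∧
           PySem.List.pyGet? jcol.2 i = PySem.List.pyGet? jcol.2 (i + 1) ∧
           PySem.List.pyGet? jcol.2 (i + 1) = some '#'
        then PySem.Set.add S (i, jcol.1) else S) S) S
    = S ++ (PySem.List.enumerate cols s0).flatMap (fun jcol =>
        ((PySem.List.pyRange 1 ((jcol.2.length : Int) - 1) 1).filter (fun i =>
          decide (PySem.List.pyGet? jcol.2 (i - 1) = PySem.List.pyGet? jcol.2 i ∧
            PySem.List.pyGet? jcol.2 i = PySem.List.pyGet? jcol.2 (i + 1) ∧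
            PySem.List.pyGet? jcol.2 (i + 1) = some '#'))).map
          (fun i => (i, jcol.1))) := by
  induction cols with
  | nil => intro s0 S _; simp [PySem.List.enumerate_nil]
  | cons l t ih =>
    intro s0 S h
    rw [PySem.List.enumerate_cons]
    simp only [List.foldl_cons, List.flatMap_cons]
    rw [fold_add_fresh _ (fun i => (i, s0)) (fun j k he => (Prod.mk.injEq .. ▸ he).1)
      _ _ (PySem.List.nodup_pyRange_one _ _)
      (fun q hq j _ he => absurd (he ▸ rfl : q.2 = s0) (by have := h _ hq; omega))]
    rw [ih (s0 + 1) _ ?_]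
    · simp
    · intro q hq
      rcases List.mem_append.mp hq with hq | hq
      · have := h _ hq; omega
      · rcases List.mem_map.mp hq with ⟨j, _, rfl⟩; simp

-- zip(*ls) of a nonempty rectangular list of rows is the list of columns
lemma zip_rect (w : Nat) : ∀ (ls : List (List Char)), ls ≠ [] → (∀ l ∈ ls, l.length = w) →
    pyZipStar ls = (List.range w).map (fun j => ls.map (fun l => l.getD j ' ')) := by
  induction w with
  | zero =>
    intro ls hne hall
    rw [pyZipStar]
    rw [dif_neg]
    · simp
    · rintro ⟨h1, h2⟩
      obtain ⟨a, t, rfl⟩ := List.exists_cons_of_ne_nil hne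
      exact h2 a (by simp) (List.eq_nil_of_length_eq_zero (hall a (by simp)))
  | succ n ih =>
    intro ls hne hall
    rw [pyZipStar]
    rw [dif_pos ⟨hne, fun l hl => by
      intro h; have := hall l hl; rw [h] at this; simp at this⟩]
    rw [ih (ls.map List.tail) (by simpa using hne)
      (by intro l hl; rcases List.mem_map.mp hl with ⟨a, ha, rfl⟩
          have := hall a ha; simp [List.length_tail, this])]
    rw [List.range_succ_eq_map]
    simp only [List.map_cons, List.map_map]
    congr 1
    · apply List.map_congr_left
      intro a ha
      have := hall a ha
      cases a with
      | nil => simp at this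
      | cons c cs => rfl
    · apply List.map_congr_left
      intro j _
      simp only [Function.comp_def]
      apply List.map_congr_left
      intro a ha
      have := hall a ha
      cases a with
      | nil => simp at this
      | cons c cs => rfl

lemma cellA_natCast (lines : List String) (k m : Nat) :
    cellA lines (k : Int) (m : Int) = lines[k]?.bind (fun row => row.toList[m]?) := by
  simp [cellA]

lemma cellA_some_iff (lines : List String) (k m : Nat) (c : Char) :
    cellA lines (k : Int) (m : Int) = some c ↔
    ∃ (hk : k < lines.length), ∃ (hm : m < lines[k].toList.length),
      lines[k].toList[m] = c := by
  rw [cellA_natCast]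
  constructor
  · intro h
    rcases Option.bind_eq_some_iff.mp h with ⟨row, hrow, hchar⟩
    have hk : k < lines.length := (List.getElem?_eq_some_iff.mp hrow).1
    have hrowv : lines[k] = row := by
      have := List.getElem?_eq_getElem hk; rw [this] at hrow; exact Option.some.inj hrow
    have hm : m < row.toList.length := (List.getElem?_eq_some_iff.mp hchar).1
    have hcv : row.toList[m] = c := by
      have := List.getElem?_eq_getElem hm; rw [this] at hchar; exact Option.some.inj hchar
    exact ⟨hk, by rw [hrowv]; exact ⟨hm, hcv⟩⟩
  · intro ⟨hk, hm, hc⟩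
    rw [List.getElem?_eq_getElem hk]
    simp only [Option.bind_some]
    rw [List.getElem?_eq_getElem hm, hc]

-- the slice test row[j-1:j+2] == '###' is the three characters at j-1, j, j+1
lemma slice3_iff (row : List Char) (j : Int) (hj : 1 ≤ j) :
    PySem.List.slice row (some (j - 1)) (some (j + 2)) = ['#', '#', '#'] ↔
    (row[(j - 1).toNat]? = some '#' ∧ row[j.toNat]? = some '#' ∧ row[(j + 1).toNat]? = some '#') := by
  rw [PySem.List.slice_toNat row (show (0:Int) ≤ j - 1 by omega) (show (0:Int) ≤ j + 2 by omega)]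
  have h3 : (j + 2).toNat - (j - 1).toNat = 3 := by omega
  have h1 : (j - 1).toNat + 1 = j.toNat := by omega
  have h2 : (j - 1).toNat + 2 = (j + 1).toNat := by omega
  rw [h3]
  generalize hm : (j - 1).toNat = m at *
  constructor
  · intro h
    have e0 : (List.take 3 (List.drop m row))[0]? = some '#' := by rw [h]; rfl
    have e1 : (List.take 3 (List.drop m row))[1]? = some '#' := by rw [h]; rfl
    have e2 : (List.take 3 (List.drop m row))[2]? = some '#' := by rw [h]; rfl
    rw [List.getElem?_take_of_lt (by omega), List.getElem?_drop] at e0 e1 e2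
    refine ⟨by simpa using e0, by rw [← h1]; simpa using e1, by rw [← h2]; simpa using e2⟩
  · intro ⟨e0, e1, e2⟩
    rw [← h1] at e1; rw [← h2] at e2
    have l0 : m < row.length := (List.getElem?_eq_some_iff.mp e0).1
    have l2 : m + 2 < row.length := (List.getElem?_eq_some_iff.mp e2).1
    apply List.ext_getElem?
    intro n
    match n with
    | 0 => rw [List.getElem?_take_of_lt (by omega), List.getElem?_drop]; simpa using e0
    | 1 => rw [List.getElem?_take_of_lt (by omega), List.getElem?_drop]; simpa using e1
    | 2 => rw [List.getElem?_take_of_lt (by omega), List.getElem?_drop]; simpa using e2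
    | (n+3) =>
      rw [List.getElem?_take_eq_none (by omega)]
      rfl

-- sums

lemma foldl_shift {α : Type} (f : Int → α → Int) (t : α → Int) (l : List α)
    (h : ∀ x ∈ l, ∀ s, f s x = s + t x) : ∀ init : Int,
    l.foldl f init = init + (l.map t).sum := by
  induction l with
  | nil => simp
  | cons x xs ih =>
    intro init
    simp only [List.foldl_cons, List.map_cons, List.sum_cons]
    rw [h x (by simp) init, ih (fun y hy s => h y (by simp [hy]) s)]
    ring

lemma foldl_two_guard {α : Type} (P Q : α → Prop) [DecidablePred P] [DecidablePred Q]
    (g : α → Int) (l : List α) : ∀ init : Int,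
    l.foldl (fun s x => if P x then s else if Q x then s + g x else s) init
    = init + (l.map (fun x => if ¬ P x ∧ Q x then g x else 0)).sum := by
  induction l with
  | nil => simp
  | cons x t ih =>
    intro init
    by_cases h : P x <;> by_cases h' : Q x <;> simp [h, h', ih, add_assoc]

lemma sum_map_filter {α : Type} (p : α → Bool) (g : α → Int) (l : List α) :
    ((l.filter p).map g).sum = (l.map (fun x => if p x then g x else 0)).sum := by
  induction l with
  | nil => simp
  | cons x t ih => by_cases h : p x <;> simp [h, ih]

lemma sum_flatMap {α : Type} (f : α → List Int) (l : List α) :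
    (l.flatMap f).sum = (l.map (fun x => (f x).sum)).sum := by
  induction l with
  | nil => simp
  | cons x t ih => simp [ih]

-- membership characterisations

lemma cellA_get?_iff (lines : List String) (k : Nat) (hk : k < lines.length) (m : Int)
    (hm : 0 ≤ m) : ∀ c, cellA lines (k : Int) m = some c ↔ lines[k].toList[m.toNat]? = some c := by
  intro c
  obtain ⟨n, rfl⟩ : ∃ n : Nat, m = (n : Int) := ⟨m.toNat, by omega⟩
  rw [cellA_natCast, List.getElem?_eq_getElem hk]
  simp

-- for a rectangular grid the transposed rows are the w columns
lemma cols_eq (lines : List String) (w : Nat) (hne : lines ≠ [])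
    (hrect : ∀ l ∈ lines, l.toList.length = w) :
    pyZipStar (lines.map String.toList)
      = (List.range w).map (fun j => lines.map (fun s => s.toList.getD j ' ')) := by
  rw [zip_rect w (lines.map String.toList) (by simpa using hne)
    (by intro l hl; rcases List.mem_map.mp hl with ⟨s, hs, rfl⟩; exact hrect s hs)]
  apply List.map_congr_left
  intro j _
  rw [List.map_map]
  rfl

-- reading a column entry is reading the grid cell
lemma cell_via_col (lines : List String) (w : Nat)
    (hrect : ∀ l ∈ lines, l.toList.length = w) (x : Int) (j : Nat) (hx : 0 ≤ x) (hj : j < w) :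
    PySem.List.pyGet? (lines.map (fun s => s.toList.getD j ' ')) x = some '#'
      ↔ cellA lines x (j : Int) = some '#' := by
  obtain ⟨m, rfl⟩ : ∃ m : Nat, x = (m : Int) := ⟨x.toNat, by omega⟩
  rw [PySem.List.pyGet?_natCast, cellA_natCast]
  by_cases hm : m < lines.length
  · rw [List.getElem?_eq_getElem (by simpa using hm), List.getElem?_eq_getElem hm]
    simp only [List.getElem_map, Option.bind_some, Option.some.injEq]
    have hl : j < lines[m].toList.length := by
      rw [hrect _ (List.getElem_mem hm)]; exact hj
    rw [List.getD_eq_getElem _ _ hl, List.getElem?_eq_getElem hl]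
    simp
  · rw [List.getElem?_eq_none (by simpa using hm), List.getElem?_eq_none (by omega)]
    simp

lemma mem_vFlat (lines : List String) (w : Nat) (hne : lines ≠ [])
    (hrect : ∀ l ∈ lines, l.toList.length = w) (a b : Int) :
    (a, b) ∈ vFlat (pyZipStar (lines.map String.toList)) ↔ 1 ≤ a ∧ 0 ≤ b ∧
      cellA lines (a - 1) b = some '#' ∧ cellA lines a b = some '#' ∧
      cellA lines (a + 1) b = some '#' := by
  rw [cols_eq lines w hne hrect]
  unfold vFlat
  constructor
  · intro hp
    rcases List.mem_flatMap.mp hp with ⟨jcol, hjc, hmem⟩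
    rcases (PySem.List.mem_enumerate_iff _ _ _).mp hjc with ⟨j0, hj0, rfl⟩
    have hj0w : j0 < w := by simpa using hj0
    have hcol : ((List.range w).map (fun j => lines.map (fun s => s.toList.getD j ' ')))[j0]
        = lines.map (fun s => s.toList.getD j0 ' ') := by
      simp [List.getElem_range]
    rcases List.mem_map.mp hmem with ⟨i, hi, hab⟩
    rcases List.mem_filter.mp hi with ⟨hi', hcond⟩
    rw [decide_eq_true_eq] at hcond
    rw [hcol] at hi' hcond
    have hlen : ((lines.map (fun s => s.toList.getD j0 ' ')).length : Int)
        = (lines.length : Int) := by simp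
    rw [hlen] at hi'
    rcases PySem.List.mem_pyRange_one.mp hi' with ⟨hi1, hi2⟩
    simp only [zero_add] at hab
    obtain ⟨rfl, rfl⟩ : i = a ∧ (j0 : Int) = b := Prod.mk.injEq .. ▸ hab
    obtain ⟨q1, q2, q3⟩ := hcond
    have e3 := q3
    have e2 : PySem.List.pyGet? (lines.map (fun s => s.toList.getD j0 ' ')) i = some '#' :=
      q2.trans e3
    have e1 : PySem.List.pyGet? (lines.map (fun s => s.toList.getD j0 ' ')) (i - 1) = some '#' :=
      q1.trans e2
    exact ⟨hi1, by positivity,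
      (cell_via_col lines w hrect (i - 1) j0 (by omega) hj0w).mp e1,
      (cell_via_col lines w hrect i j0 (by omega) hj0w).mp e2,
      (cell_via_col lines w hrect (i + 1) j0 (by omega) hj0w).mp e3⟩
  · intro ⟨h1, h0, c0, c1, c2⟩
    obtain ⟨j0, rfl⟩ : ∃ j0 : Nat, b = (j0 : Int) := ⟨b.toNat, by omega⟩
    have hc2 := c2
    rw [show a + 1 = (((a + 1).toNat : Nat) : Int) by omega] at hc2
    rcases (cellA_some_iff lines (a + 1).toNat j0 '#').mp hc2 with ⟨hkk, hmm, _⟩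
    have hj0w : j0 < w := by
      rw [hrect _ (List.getElem_mem hkk)] at hmm; exact hmm
    have hcol : ((List.range w).map (fun j => lines.map (fun s => s.toList.getD j ' ')))[j0]'(by simpa using hj0w)
        = lines.map (fun s => s.toList.getD j0 ' ') := by
      simp [List.getElem_range]
    have e1 := (cell_via_col lines w hrect (a - 1) j0 (by omega) hj0w).mpr c0
    have e2 := (cell_via_col lines w hrect a j0 (by omega) hj0w).mpr c1
    have e3 := (cell_via_col lines w hrect (a + 1) j0 (by omega) hj0w).mpr c2
    apply List.mem_flatMap.mpr
    refine ⟨((j0 : Int), lines.map (fun s => s.toList.getD j0 ' ')), ?_, ?_⟩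
    · apply (PySem.List.mem_enumerate_iff _ _ _).mpr
      exact ⟨j0, by simpa using hj0w, by rw [hcol]; simp⟩
    · apply List.mem_map.mpr
      refine ⟨a, List.mem_filter.mpr ⟨?_, ?_⟩, by simp⟩
      · apply PySem.List.mem_pyRange_one.mpr
        have : ((lines.map (fun s => s.toList.getD j0 ' ')).length : Int)
            = (lines.length : Int) := by simp
        rw [this]
        omega
      · rw [decide_eq_true_eq]
        exact ⟨e1.trans e2.symm, e2.trans e3.symm, e3⟩

-- the core computation: A's guarded double loop equals B's filtered-intersection sum
lemma core (lines : List String) (w : Nat) (hne : lines ≠ [])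
    (hrect : ∀ l ∈ lines, l.toList.length = w) :
    (PySem.List.enumerate lines).foldl (fun s iw =>
      if iw.1 = 0 ∨ iw.1 = (lines.length : Int) - 1 then s
      else (PySem.List.enumerate iw.2.toList).foldl (fun s jc =>
        if jc.1 = 0 ∨ jc.1 = (w : Int) - 1 then s
        else if [some jc.2, cellA lines iw.1 (jc.1 - 1), cellA lines iw.1 (jc.1 + 1),
                 cellA lines (iw.1 - 1) jc.1, cellA lines (iw.1 + 1) jc.1]
                = [some '#', some '#', some '#', some '#', some '#']
             then s + iw.1 * jc.1 else s) s) 0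
    = ((hFlat lines).filter (fun p =>
        PySem.Set.contains (vFlat (pyZipStar (lines.map String.toList))) p)).foldl
        (fun s p => s + p.1 * p.2) 0 := by
  rw [PySem.List.foldl_add]
  rw [foldl_shift _ (fun iw : Int × String =>
      if iw.1 = 0 ∨ iw.1 = (lines.length : Int) - 1 then 0
      else ((PySem.List.enumerate iw.2.toList).map (fun jc =>
        if ¬ (jc.1 = 0 ∨ jc.1 = (w : Int) - 1) ∧
           [some jc.2, cellA lines iw.1 (jc.1 - 1), cellA lines iw.1 (jc.1 + 1),
            cellA lines (iw.1 - 1) jc.1, cellA lines (iw.1 + 1) jc.1]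
           = [some '#', some '#', some '#', some '#', some '#']
        then iw.1 * jc.1 else 0)).sum) _ ?_ 0]
  swap
  · intro iw _ s
    beta_reduce
    by_cases hs : iw.1 = 0 ∨ iw.1 = (lines.length : Int) - 1
    · simp [hs]
    · rw [if_neg hs, if_neg hs,
        foldl_two_guard (P := fun jc : Int × Char => jc.1 = 0 ∨ jc.1 = (w : Int) - 1)
          (Q := fun jc : Int × Char =>
            [some jc.2, cellA lines iw.1 (jc.1 - 1), cellA lines iw.1 (jc.1 + 1),
             cellA lines (iw.1 - 1) jc.1, cellA lines (iw.1 + 1) jc.1]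
            = [some '#', some '#', some '#', some '#', some '#'])
          (g := fun jc => iw.1 * jc.1)]
  unfold hFlat
  rw [List.filter_flatMap, List.map_flatMap, sum_flatMap]
  simp only [zero_add]
  apply congrArg List.sum
  apply List.map_congr_left
  intro iw hiw
  rcases (PySem.List.mem_enumerate_iff _ _ _).mp hiw with ⟨k, hk, rfl⟩
  simp only [zero_add]
  have hwk : lines[k].toList.length = w := hrect _ (List.getElem_mem hk)
  rw [List.filter_map, List.map_map, List.filter_filter,
    sum_map_filter, PySem.Str.len_eq, hwk]
  by_cases hb : (k : Int) = 0 ∨ (k : Int) = (lines.length : Int) - 1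
  · rw [if_pos hb]
    symm
    apply List.sum_eq_zero
    intro x hx
    rcases List.mem_map.mp hx with ⟨j, _, rfl⟩
    dsimp only [Function.comp_def]
    split_ifs with hcnd
    · exfalso
      rcases Bool.and_eq_true .. ▸ hcnd with ⟨hcv, _⟩
      have hmem := (PySem.Set.contains_iff _ _).mp hcv
      rcases (mem_vFlat lines w hne hrect (k : Int) j).mp hmem with ⟨hk1, hj0, _, _, hc2⟩
      rcases hb with hb | hb
      · omega
      · rw [show (k : Int) + 1 = ((k + 1 : Nat) : Int) by push_cast; ring] at hc2
        rw [show j = ((j.toNat : Nat) : Int) by omega] at hc2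
        rcases (cellA_some_iff lines (k + 1) j.toNat '#').mp hc2 with ⟨hlt, _, _⟩
        omega
    · rfl
  · rw [if_neg hb]
    rw [PySem.List.enumerate_eq_map_pyRange lines[k].toList ' ', List.map_map]
    rw [show PySem.List.len lines[k].toList = (w : Int) by simp [PySem.List.len, hwk]]
    by_cases hw2 : 2 ≤ w
    · rw [PySem.List.pyRange_one_append 0 1 (w : Int) (by omega) (by omega),
          PySem.List.pyRange_one_append 1 ((w : Int) - 1) (w : Int) (by omega) (by omega)]
      rw [show PySem.List.pyRange 0 1 1 = [0] by
            simpa using PySem.List.pyRange_one_singleton 0,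
          show PySem.List.pyRange ((w : Int) - 1) (w : Int) 1 = [(w : Int) - 1] by
            have := PySem.List.pyRange_one_singleton ((w : Int) - 1)
            rw [show (w : Int) - 1 + 1 = (w : Int) by ring] at this
            exact this]
      simp only [List.map_append, List.sum_append, List.map_cons, List.map_nil,
        List.sum_cons, List.sum_nil, Function.comp_def]
      rw [if_neg (by rintro ⟨hno, -⟩; exact hno (Or.inl trivial)),
          if_neg (by rintro ⟨hno, -⟩; exact hno (Or.inr trivial))]
      simp only [add_zero, zero_add]
      apply congrArg List.sum
      apply List.map_congr_left
      intro j hj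
      dsimp only
      rcases PySem.List.mem_pyRange_one.mp hj with ⟨hj1, hj2⟩
      have hk1 : 1 ≤ k := by
        rcases Nat.eq_zero_or_pos k with h0 | h0
        · exact absurd (Or.inl (by simp [h0])) hb
        · exact h0
      have hk2 : k + 1 < lines.length := by
        have : (k : Int) ≠ (lines.length : Int) - 1 := fun h => hb (Or.inr h)
        omega
      have hjw : j.toNat < lines[k].toList.length := by omega
      have hfirst : some (PySem.List.pyGetD lines[k].toList j ' ') = some '#'
          ↔ cellA lines (k : Int) j = some '#' := by
        rw [PySem.List.pyGetD_of_nonneg _ _ (by omega),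
            cellA_get?_iff lines k hk j (by omega),
            List.getD_eq_getElem _ _ hjw, List.getElem?_eq_getElem hjw]
      have hAiff : (¬ (j = 0 ∨ j = (w : Int) - 1) ∧
          [some (PySem.List.pyGetD lines[k].toList j ' '), cellA lines (k : Int) (j - 1),
           cellA lines (k : Int) (j + 1), cellA lines ((k : Int) - 1) j,
           cellA lines ((k : Int) + 1) j]
          = [some '#', some '#', some '#', some '#', some '#'])
          ↔ ((PySem.Set.contains (vFlat (pyZipStar (lines.map String.toList))) ((k : Int), j) &&
              decide (PySem.List.slice lines[k].toList (some (j - 1)) (some (j + 2))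
                = ['#', '#', '#'])) = true) := by
        rw [Bool.and_eq_true, decide_eq_true_eq, PySem.Set.contains_iff]
        rw [mem_vFlat lines w hne hrect, slice3_iff _ _ hj1]
        simp only [List.cons.injEq, and_true]
        constructor
        · rintro ⟨hg, h0, h1, h2, h3, h4⟩
          exact ⟨⟨by omega, by omega, h3, hfirst.mp h0, h4⟩,
            (cellA_get?_iff lines k hk (j - 1) (by omega) '#').mp h1,
            (cellA_get?_iff lines k hk j (by omega) '#').mp (hfirst.mp h0),
            (cellA_get?_iff lines k hk (j + 1) (by omega) '#').mp h2⟩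
        · rintro ⟨⟨-, -, v1, v2, v3⟩, e0, e1, e2⟩
          exact ⟨by rintro (h | h) <;> omega,
            hfirst.mpr ((cellA_get?_iff lines k hk j (by omega) '#').mpr e1),
            (cellA_get?_iff lines k hk (j - 1) (by omega) '#').mpr e0,
            (cellA_get?_iff lines k hk (j + 1) (by omega) '#').mpr e2, v1, v3⟩
      by_cases hA : (¬ (j = 0 ∨ j = (w : Int) - 1) ∧
          [some (PySem.List.pyGetD lines[k].toList j ' '), cellA lines (k : Int) (j - 1),
           cellA lines (k : Int) (j + 1), cellA lines ((k : Int) - 1) j,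
           cellA lines ((k : Int) + 1) j]
          = [some '#', some '#', some '#', some '#', some '#'])
      · rw [if_pos hA, if_pos (hAiff.mp hA)]
      · rw [if_neg hA, if_neg (fun hcnd => hA (hAiff.mpr hcnd))]
    · have hB : PySem.List.pyRange 1 ((w : Int) - 1) 1 = [] :=
        PySem.List.pyRange_one_eq_nil (by omega)
      rw [hB]
      apply List.sum_eq_zero
      intro x hx
      rcases List.mem_map.mp hx with ⟨j, hj, rfl⟩
      rcases PySem.List.mem_pyRange_one.mp hj with ⟨hj1, hj2⟩
      have : j = 0 := by omega
      dsimp only [Function.comp_def]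
      rw [if_neg (by rintro ⟨hno, -⟩; exact hno (Or.inl this))]

-- ===== VERDICT (by name: the statement is the Claim_ definition above) =====
theorem solve_spec : Claim_equal_solve := by
  intro fs _ hpre
  unfold Spec_solve solve solve_alt
  obtain ⟨hne, hlen⟩ := hpre
  obtain ⟨l0, rest, hcons⟩ := List.exists_cons_of_ne_nil hne
  simp only []
  rw [hcons] at hlen
  rw [hcons]
  have hrect : ∀ l ∈ (l0 :: rest), l.toList.length = l0.toList.length := by
    intro l hl
    have h := hlen l hl
    rw [PySem.Str.len_eq, PySem.Str.len_eq] at h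
    simpa using h
  have hH : hsetOf (l0 :: rest) = hFlat (l0 :: rest) := by
    unfold hsetOf hFlat
    simpa using hset_eq_flat (l0 :: rest) 0 [] (by simp)
  have hV : vsetOf (l0 :: rest)
      = vFlat (pyZipStar ((l0 :: rest).map String.toList)) := by
    unfold vsetOf vFlat
    simpa using vset_eq_flat (pyZipStar ((l0 :: rest).map String.toList)) 0 [] (by simp)
  have hw : (PySem.List.pyGet? (l0 :: rest) 0).elim 0 PySem.Str.len
      = ((l0.toList.length : Nat) : Int) := by
    rw [PySem.List.pyGet?_zero_cons]
    simp [PySem.Str.len_eq]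
  rw [hH, hV, hw]
  rw [show PySem.Set.inter (hFlat (l0 :: rest))
        (vFlat (pyZipStar ((l0 :: rest).map String.toList)))
      = (hFlat (l0 :: rest)).filter (fun p =>
          PySem.Set.contains (vFlat (pyZipStar ((l0 :: rest).map String.toList))) p) from rfl]
  exact core (l0 :: rest) l0.toList.length (by simp) hrect
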